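-- pv_equiv track=rewrite | github.com/markbroich/coding_challenges_example_solutions | coding_challenges_example_solutions/max_people_alive_challange/max-people_alive.py | get_max_index_running_sum
-- ===== SOURCE A (Python) =====
-- def get_max_index_running_sum(deltas):
--     running_sum = 0
--     max_running_sum = 0
--     year_peak = 0
--     for year in range(0, len(deltas)):
--         running_sum += deltas[year]
--         if(running_sum > max_running_sum):
--             max_running_sum = running_sum
--             year_peak = year
--     return year_peak
-- ===== SOURCE B (Python) =====
-- def get_max_index_running_sum(deltas):
--     prefix = []
--     s = 0
--     for d in deltas:
--         s += d
--         prefix.append(s)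
--     if not prefix:
--         return 0
--     m = max(prefix)
--     if m <= 0:
--         return 0
--     return prefix.index(m)
-- ===== Notes on version B (the rewrite author's own statement) =====
-- stated objective: idiomatic
-- what changed: A's single interleaved running-sum/record-tracking loop becomes a build-the-prefix-sum-table pass followed by a separate max-then-first-index lookup (max/list.index).
import Mathlib
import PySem

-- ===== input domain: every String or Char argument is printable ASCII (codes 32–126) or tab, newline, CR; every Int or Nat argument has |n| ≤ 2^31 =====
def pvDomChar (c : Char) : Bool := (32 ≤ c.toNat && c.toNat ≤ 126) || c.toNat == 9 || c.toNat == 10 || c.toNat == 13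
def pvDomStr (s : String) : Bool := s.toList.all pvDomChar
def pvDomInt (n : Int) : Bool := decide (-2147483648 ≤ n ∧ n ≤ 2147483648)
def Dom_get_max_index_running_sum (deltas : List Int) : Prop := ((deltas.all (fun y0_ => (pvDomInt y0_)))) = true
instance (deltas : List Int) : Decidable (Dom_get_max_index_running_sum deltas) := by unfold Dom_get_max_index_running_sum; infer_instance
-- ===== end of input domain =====

-- B replaces A's interleaved running-sum/record loop by a prefix-sum table then a separate max + first-index lookup (idiomatic decomposition, same O(n)).
-- ===== PORT A =====
-- the for-loop over range(0, len(deltas)): structural recursion over the list carrying (year, running_sum, max_running_sum, year_peak)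
def pvLoopA : List Int → Int → Int → Int → Int → Int
  | [], _, _, _, year_peak => year_peak
  | d :: rest, year, running_sum, max_running_sum, year_peak =>
      let running_sum' := running_sum + d
      if running_sum' > max_running_sum then
        pvLoopA rest (year + 1) running_sum' running_sum' year
      else
        pvLoopA rest (year + 1) running_sum' max_running_sum year_peak

def get_max_index_running_sum (deltas : List Int) : Int :=
  pvLoopA deltas 0 0 0 0

-- ===== PORT B =====
-- the prefix-building loop of Source B: s runs, each new s is appended
def pvAccum (s : Int) : List Int → List Int
  | [] => []
  | d :: rest => (s + d) :: pvAccum (s + d) rest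

def get_max_index_running_sum_alt (deltas : List Int) : Int :=
  let pref := pvAccum 0 deltas
  match PySem.List.max? pref (fun y => y) with
  | none => 0              -- "if not prefix: return 0"
  | some m =>
      if m ≤ 0 then 0
      else ((PySem.List.index? pref m).getD 0 : Nat)  -- m = max(prefix) ∈ prefix, so index? is never none

-- ===== PRECONDITION & SPEC =====
def Spec_get_max_index_running_sum (deltas : List Int) (out : Int) : Prop := out = get_max_index_running_sum_alt deltas
instance (deltas : List Int) (out : Int) : Decidable (Spec_get_max_index_running_sum deltas out) := by unfold Spec_get_max_index_running_sum; infer_instance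

-- ===== CLAIM (what is proved, stated in full; the proofs are below) =====
def Claim_equal_get_max_index_running_sum : Prop := ∀ (deltas : List Int), Dom_get_max_index_running_sum deltas → Spec_get_max_index_running_sum deltas (get_max_index_running_sum deltas)

-- ===== LEMMAS AND PROOFS =====

lemma pvFoldlMax_of_max? {t : List Int} {m : Int}
    (h : PySem.List.max? t (fun y => y) = some m) (x : Int) :
    t.foldl max x = max x m := by
  cases t with
  | nil => simp [PySem.List.max?] at h
  | cons y t' =>
      rw [PySem.List.max?_id_cons] at h
      cases h
      show List.foldl max (max x y) t' = _
      exact List.foldl_assoc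

lemma pvLoopA_eq (l : List Int) (i rs mx pk : Int) :
    pvLoopA l i rs mx pk =
      match PySem.List.max? (pvAccum rs l) (fun y => y) with
      | none => pk
      | some m =>
          if mx < m then i + (((PySem.List.index? (pvAccum rs l) m).getD 0 : Nat) : Int)
          else pk := by
  induction l generalizing i rs mx pk with
  | nil => simp [pvLoopA, pvAccum, PySem.List.max?]
  | cons d t ih =>
      have hacc : pvAccum rs (d :: t) = (rs + d) :: pvAccum (rs + d) t := rfl
      have hloop : pvLoopA (d :: t) i rs mx pk =
          if rs + d > mx then pvLoopA t (i + 1) (rs + d) (rs + d) i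
          else pvLoopA t (i + 1) (rs + d) mx pk := rfl
      rw [hacc, hloop, PySem.List.max?_id_cons]
      cases hmt : PySem.List.max? (pvAccum (rs + d) t) (fun y => y) with
      | none =>
          have ht : pvAccum (rs + d) t = [] :=
            (PySem.List.max?_eq_none_iff _ _).mp hmt
          rw [ht]
          simp only [List.foldl]
          by_cases h : mx < rs + d
          · rw [if_pos (show rs + d > mx from h)]
            rw [ih, ht]
            dsimp only [PySem.List.max?, List.foldl]
            rw [if_pos h, PySem.List.index?_cons_self]
            simp
          · rw [if_neg (show ¬ rs + d > mx from h)]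
            rw [ih, ht]
            dsimp only [PySem.List.max?, List.foldl]
            rw [if_neg h]
      | some m =>
          have hfold : (pvAccum (rs + d) t).foldl max (rs + d) = max (rs + d) m :=
            pvFoldlMax_of_max? hmt (rs + d)
          rw [hfold]
          have hmem : m ∈ pvAccum (rs + d) t := PySem.List.max?_mem hmt
          obtain ⟨k, hk⟩ := Option.isSome_iff_exists.mp
            ((PySem.List.index?_isSome_iff _ _).mpr hmem)
          by_cases h : mx < rs + d
          · rw [if_pos (show rs + d > mx from h)]
            rw [ih, hmt]
            dsimp only
            by_cases h2 : rs + d < m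
            · have hne : rs + d ≠ m := by omega
              rw [if_pos h2, if_pos (show mx < max (rs + d) m by omega)]
              rw [show max (rs + d) m = m by omega]
              rw [PySem.List.index?_cons_of_ne _ hne, hk]
              simp only [Option.map_some, Option.getD_some]
              push_cast; ring
            · rw [if_neg h2, if_pos (show mx < max (rs + d) m by omega)]
              have hmax : max (rs + d) m = rs + d := by omega
              rw [hmax, PySem.List.index?_cons_self]
              simp
          · rw [if_neg (show ¬ rs + d > mx from h)]
            rw [ih, hmt]
            dsimp only
            by_cases h2 : mx < m
            · have hne : rs + d ≠ m := by omega
              rw [if_pos h2, if_pos (show mx < max (rs + d) m by omega)]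
              rw [show max (rs + d) m = m by omega]
              rw [PySem.List.index?_cons_of_ne _ hne, hk]
              simp only [Option.map_some, Option.getD_some]
              push_cast; ring
            · rw [if_neg h2, if_neg (show ¬ mx < max (rs + d) m by omega)]

-- ===== VERDICT (by name: the statement is the Claim_ definition above) =====
theorem get_max_index_running_sum_spec : Claim_equal_get_max_index_running_sum := by
  intro deltas _
  unfold Spec_get_max_index_running_sum get_max_index_running_sum get_max_index_running_sum_alt
  rw [pvLoopA_eq]
  cases h : PySem.List.max? (pvAccum 0 deltas) (fun y => y) with
  | none => simp [h]
  | some m =>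
      simp only [h]
      by_cases hm : (0:Int) < m
      · rw [if_pos hm, if_neg (show ¬ m ≤ 0 by omega)]
        simp
      · rw [if_neg hm, if_pos (show m ≤ 0 by omega)]
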